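-- pv_equiv track=rewrite | github.com/dangnmd/codebase | codebase_lib/utils.py | block2
-- ===== SOURCE A (Python) =====
-- def block2(x):
-- 	v = []
-- 	result = []
-- 	while x > 0:
-- 		v.append(int(x % 2))
-- 		x = int(x / 2)
-- 	for i in range(0, len(v)):
-- 		if v[i] == 1:
-- 			result.append(2**i)
-- 	return result
-- ===== SOURCE B (Python) =====
-- def block2(x):
-- 	result = []
-- 	p = 1
-- 	while x > 0:
-- 		if x % 2 == 1:
-- 			result.append(p)
-- 		p *= 2
-- 		x //= 2
-- 	return result
-- ===== Notes on version B (the rewrite author's own statement) =====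
-- stated objective: simpler
-- what changed: B fuses A's two passes into one loop that maintains the running power of two, removing the intermediate binary-digit list and the second indexed scan.
import Mathlib
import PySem

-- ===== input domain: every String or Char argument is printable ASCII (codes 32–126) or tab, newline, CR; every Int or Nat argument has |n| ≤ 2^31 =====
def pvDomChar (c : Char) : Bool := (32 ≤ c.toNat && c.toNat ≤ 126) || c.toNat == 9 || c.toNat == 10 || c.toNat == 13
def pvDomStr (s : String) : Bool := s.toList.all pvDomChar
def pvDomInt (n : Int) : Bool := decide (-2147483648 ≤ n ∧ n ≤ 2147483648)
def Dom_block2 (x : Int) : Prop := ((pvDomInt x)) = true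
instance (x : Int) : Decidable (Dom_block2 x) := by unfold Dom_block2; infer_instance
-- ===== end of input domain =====

-- B fuses A's two passes (collect binary digits, then scan them for 1s) into one loop
-- maintaining the running power of two; same cost, no temporary list (objective: simpler).

-- ===== PORT A =====
-- A's first while-loop: v.append(int(x % 2)); x = int(x / 2).
-- On the loop's domain 0 < x ≤ 2^31 the float division x/2 is exact and int() truncation
-- equals floor division, so int(x / 2) = PySem.Int.floordiv x 2 there.
def block2_bits (x : Int) : List Int :=
  if _h : 0 < x then PySem.Int.mod x 2 :: block2_bits (PySem.Int.floordiv x 2) else []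
termination_by x.toNat
decreasing_by
  rw [PySem.Int.floordiv_eq_ediv_of_pos (by omega : (0:Int) < 2)]; omega

def block2 (x : Int) : List Int :=
  let v := block2_bits x
  (List.range v.length).foldl
    (fun result i => if v.getD i 0 == 1 then result ++ [2 ^ i] else result) []

-- ===== PORT B =====
-- Source B's single while-loop with state (x, p, result).
def block2_loop (x p : Int) (result : List Int) : List Int :=
  if _h : 0 < x then
    block2_loop (PySem.Int.floordiv x 2) (p * 2)
      (if PySem.Int.mod x 2 == 1 then result ++ [p] else result)
  else result
termination_by x.toNat
decreasing_by
  rw [PySem.Int.floordiv_eq_ediv_of_pos (by omega : (0:Int) < 2)]; omega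

def block2_alt (x : Int) : List Int := block2_loop x 1 []

-- ===== PRECONDITION & SPEC =====
def Spec_block2 (x : Int) (out : List Int) : Prop := out = block2_alt x
instance (x : Int) (out : List Int) : Decidable (Spec_block2 x out) := by unfold Spec_block2; infer_instance

-- ===== CLAIM (what is proved, stated in full; the proofs are below) =====
def Claim_equal_block2 : Prop := ∀ (x : Int), Dom_block2 x → Spec_block2 x (block2 x)

-- ===== LEMMAS AND PROOFS =====

-- B's loop computes, over the digit list A builds, the filtered powers scaled by p.
theorem block2_loop_eq (x p : Int) (acc : List Int) :
    block2_loop x p acc =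
      acc ++ (((List.range (block2_bits x).length).filter
                (fun i => (block2_bits x).getD i 0 == 1)).map (fun i => p * 2 ^ i)) := by
  by_cases h : 0 < x
  · rw [block2_loop, block2_bits]
    simp only [h, dif_pos]
    rw [block2_loop_eq (PySem.Int.floordiv x 2) (p * 2)]
    simp only [List.length_cons, List.range_succ_eq_map, List.filter_cons, List.filter_map,
      List.getD_cons_zero, List.getD_cons_succ, Function.comp_def]
    have hp : ∀ i : Nat, p * 2 ^ (i + 1) = p * 2 * 2 ^ i := by
      intro i; ring
    rw [PySem.Int.mod_eq_emod_of_pos (by omega : (0:Int) < 2)]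
    by_cases hb : x % 2 = 1
    · simp [hb, hp]
    · simp [hb, hp]
  · rw [block2_loop, block2_bits]
    simp [h]
termination_by x.toNat
decreasing_by
  rw [PySem.Int.floordiv_eq_ediv_of_pos (by omega : (0:Int) < 2)]; omega

-- ===== VERDICT (by name: the statement is the Claim_ definition above) =====
theorem block2_spec : Claim_equal_block2 := by
  intro x _
  show block2 x = block2_alt x
  rw [block2, block2_alt, block2_loop_eq, PySem.List.foldl_append_if]
  simp [one_mul]
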